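-- pv_equiv track=rewrite | github.com/muskan-shah-02/dokydoc | backend/app/tasks/code_analysis_tasks.py | _file_analysis_priority
-- ===== SOURCE A (Python) =====
-- def _file_analysis_priority(file_info: dict) -> tuple:
--     """
--     Sort files so foundational files are analyzed first (models, schemas, config)
--     and dependent files later (controllers, views, tests).
--     This makes cross-file context more useful — controllers benefit from
--     knowing about models that were analyzed earlier.
--     """
--     path = file_info.get("path", "").lower()
--     if any(k in path for k in ["model", "schema", "entity", "base", "config", "settings", "types"]):
--         return (0, path)
--     if any(k in path for k in ["service", "util", "helper", "middleware", "lib", "core"]):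
--         return (1, path)
--     if any(k in path for k in ["controller", "route", "endpoint", "api", "view", "handler", "page"]):
--         return (2, path)
--     if any(k in path for k in ["test", "spec", "fixture", "__test__"]):
--         return (3, path)
--     return (1, path)  # Default: same priority as services
-- ===== SOURCE B (Python) =====
-- _KEYWORD_PRIORITY = {
--     "model": 0, "schema": 0, "entity": 0, "base": 0, "config": 0, "settings": 0, "types": 0,
--     "service": 1, "util": 1, "helper": 1, "middleware": 1, "lib": 1, "core": 1,
--     "controller": 2, "route": 2, "endpoint": 2, "api": 2, "view": 2, "handler": 2, "page": 2,
--     "test": 3, "spec": 3, "fixture": 3, "__test__": 3,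
-- }
--
--
-- def _file_analysis_priority(file_info: dict) -> tuple:
--     path = file_info.get("path", "").lower()
--     matched = [p for k, p in _KEYWORD_PRIORITY.items() if k in path]
--     return (min(matched) if matched else 1, path)
-- ===== Notes on version B (the rewrite author's own statement) =====
-- stated objective: simpler
-- what changed: Replaces the four-branch if-chain of any() scans by one flat keyword-to-priority table scanned once, returning the minimum matched priority (default 1); correct because group priorities ascend in the chain's order.
import Mathlib
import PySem

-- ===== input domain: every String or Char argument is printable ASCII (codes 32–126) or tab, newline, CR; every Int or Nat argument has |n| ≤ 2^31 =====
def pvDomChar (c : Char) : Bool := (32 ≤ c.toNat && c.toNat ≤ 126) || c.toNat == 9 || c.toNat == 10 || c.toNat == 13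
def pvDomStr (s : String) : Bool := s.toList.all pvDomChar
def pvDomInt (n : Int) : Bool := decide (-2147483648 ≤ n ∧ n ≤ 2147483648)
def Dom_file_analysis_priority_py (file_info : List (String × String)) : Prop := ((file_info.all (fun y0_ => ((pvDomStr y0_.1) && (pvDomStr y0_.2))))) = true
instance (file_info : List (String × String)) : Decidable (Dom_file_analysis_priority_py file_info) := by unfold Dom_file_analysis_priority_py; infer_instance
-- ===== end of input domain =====

-- B replaces the four-branch if-chain by one flat keyword→priority table and takes the
-- minimum matched priority (default 1) — simpler; valid since group priorities ascend.

-- ===== PORT A =====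
def pvGroup0 : List String := ["model", "schema", "entity", "base", "config", "settings", "types"]
def pvGroup1 : List String := ["service", "util", "helper", "middleware", "lib", "core"]
def pvGroup2 : List String := ["controller", "route", "endpoint", "api", "view", "handler", "page"]
def pvGroup3 : List String := ["test", "spec", "fixture", "__test__"]

def file_analysis_priority_py (file_info : List (String × String)) : Int × String :=
  let path := PySem.Str.lower ((PySem.Dict.mk file_info).getD "path" "")
  if pvGroup0.any (fun k => PySem.Str.isIn k path) then (0, path)
  else if pvGroup1.any (fun k => PySem.Str.isIn k path) then (1, path)
  else if pvGroup2.any (fun k => PySem.Str.isIn k path) then (2, path)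
  else if pvGroup3.any (fun k => PySem.Str.isIn k path) then (3, path)
  else (1, path)

-- ===== PORT B =====
def pvKwTable : List (String × Int) :=
  [("model", 0), ("schema", 0), ("entity", 0), ("base", 0), ("config", 0), ("settings", 0), ("types", 0),
   ("service", 1), ("util", 1), ("helper", 1), ("middleware", 1), ("lib", 1), ("core", 1),
   ("controller", 2), ("route", 2), ("endpoint", 2), ("api", 2), ("view", 2), ("handler", 2), ("page", 2),
   ("test", 3), ("spec", 3), ("fixture", 3), ("__test__", 3)]

def file_analysis_priority_py_alt (file_info : List (String × String)) : Int × String :=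
  let path := PySem.Str.lower ((PySem.Dict.mk file_info).getD "path" "")
  let matched := (pvKwTable.filter (fun kp => PySem.Str.isIn kp.1 path)).map Prod.snd
  (match PySem.List.min? matched (fun x => x) with
   | some m => m
   | none => 1, path)

-- ===== PRECONDITION & SPEC =====
def Spec_file_analysis_priority_py (file_info : List (String × String)) (out : Int × String) : Prop := out = file_analysis_priority_py_alt file_info
instance (file_info : List (String × String)) (out : Int × String) : Decidable (Spec_file_analysis_priority_py file_info out) := by unfold Spec_file_analysis_priority_py; infer_instance

-- ===== CLAIM (what is proved, stated in full; the proofs are below) =====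
def Claim_equal_file_analysis_priority_py : Prop := ∀ (file_info : List (String × String)), Dom_file_analysis_priority_py file_info → Spec_file_analysis_priority_py file_info (file_analysis_priority_py file_info)

-- ===== LEMMAS AND PROOFS =====

-- folding min over elements all ≥ c leaves c
theorem pv_foldl_min_const (c : Int) : ∀ (ys : List Int), (∀ y ∈ ys, c ≤ y) → ys.foldl min c = c := by
  intro ys
  induction ys with
  | nil => intro _; rfl
  | cons y t ih =>
    intro h
    have hc : min c y = c := min_eq_left (h y (by simp))
    simpa [List.foldl, hc] using ih (fun z hz => h z (by simp [hz]))

-- min? of (all-c nonempty) ++ (all ≥ c) is c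
theorem pv_min?_const (c : Int) (l r : List Int) (hl : ∀ x ∈ l, x = c) (hr : ∀ x ∈ r, c ≤ x)
    (hne : l ≠ []) : PySem.List.min? (l ++ r) (fun x => x) = some c := by
  cases l with
  | nil => exact absurd rfl hne
  | cons x t =>
    have hx : x = c := hl x (by simp)
    rw [List.cons_append, PySem.List.min?_id_cons, hx]
    congr 1
    apply pv_foldl_min_const
    intro y hy
    rcases List.mem_append.mp hy with h | h
    · exact le_of_eq (hl y (by simp [h])).symm
    · exact hr y h

-- the core equivalence, for an arbitrary keyword predicate p
theorem pv_core (path : String) (p : String → Bool) :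
    (if pvGroup0.any p then ((0 : Int), path)
     else if pvGroup1.any p then (1, path)
     else if pvGroup2.any p then (2, path)
     else if pvGroup3.any p then (3, path)
     else (1, path)) =
    ((match PySem.List.min? ((pvKwTable.filter (fun kp => p kp.1)).map Prod.snd) (fun x => x) with
      | some m => m
      | none => 1), path) := by
  have htab : pvKwTable = pvGroup0.map (fun k => (k, (0 : Int))) ++ pvGroup1.map (fun k => (k, 1))
      ++ pvGroup2.map (fun k => (k, 2)) ++ pvGroup3.map (fun k => (k, 3)) := by rfl
  have hmatched : (pvKwTable.filter (fun kp => p kp.1)).map Prod.snd =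
      (pvGroup0.filter p).map (fun _ => (0 : Int)) ++ ((pvGroup1.filter p).map (fun _ => 1)
      ++ ((pvGroup2.filter p).map (fun _ => 2) ++ (pvGroup3.filter p).map (fun _ => 3))) := by
    rw [htab]
    simp [List.filter_append, List.filter_map, Function.comp_def, List.append_assoc]
  rw [hmatched]
  have hgroup : ∀ (g : List String), g.any p = false → List.filter p g = [] := by
    intro g hg
    exact List.filter_eq_nil_iff.mpr (by simpa using List.any_eq_false.mp hg)
  have hmemconst : ∀ (c : Int) (g : List String), ∀ x ∈ (List.filter p g).map (fun _ => c), x = c := by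
    intro c g x hx
    rcases List.mem_map.mp hx with ⟨a, _, ha⟩
    exact ha.symm
  have hge : ∀ (c d : Int), c ≤ d → ∀ (g : List String), ∀ x ∈ (List.filter p g).map (fun _ => d), c ≤ x := by
    intro c d hcd g x hx
    have := hmemconst d g x hx; omega
  have hne : ∀ (c : Int) (g : List String), g.any p = true → (List.filter p g).map (fun _ => c) ≠ [] := by
    intro c g hg
    rcases List.any_eq_true.mp hg with ⟨x, hx, hpx⟩
    simp only [ne_eq, List.map_eq_nil_iff, List.filter_eq_nil_iff]
    intro hcontra
    exact absurd hpx (by simpa using hcontra x hx)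
  cases h0 : pvGroup0.any p with
  | true =>
    rw [pv_min?_const 0 _ _ (hmemconst 0 pvGroup0)
      (fun x hx => by
        rcases List.mem_append.mp hx with h | h
        · exact hge 0 1 (by norm_num) _ x h
        · rcases List.mem_append.mp h with h | h
          · exact hge 0 2 (by norm_num) _ x h
          · exact hge 0 3 (by norm_num) _ x h)
      (hne 0 _ h0)]
    simp
  | false =>
    rw [hgroup _ h0]
    simp only [List.map_nil, List.nil_append]
    cases h1 : pvGroup1.any p with
    | true =>
      rw [pv_min?_const 1 _ _ (hmemconst 1 pvGroup1)
        (fun x hx => by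
          rcases List.mem_append.mp hx with h | h
          · exact hge 1 2 (by norm_num) _ x h
          · exact hge 1 3 (by norm_num) _ x h)
        (hne 1 _ h1)]
      simp
    | false =>
      rw [hgroup _ h1]
      simp only [List.map_nil, List.nil_append]
      cases h2 : pvGroup2.any p with
      | true =>
        rw [pv_min?_const 2 _ _ (hmemconst 2 pvGroup2)
          (fun x hx => hge 2 3 (by norm_num) _ x hx)
          (hne 2 _ h2)]
        simp
      | false =>
        rw [hgroup _ h2]
        simp only [List.map_nil, List.nil_append]
        cases h3 : pvGroup3.any p with
        | true =>
          rw [show (List.filter p pvGroup3).map (fun _ => (3:Int)) =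
              (List.filter p pvGroup3).map (fun _ => (3:Int)) ++ [] by simp,
            pv_min?_const 3 _ [] (hmemconst 3 pvGroup3) (by simp) (hne 3 _ h3)]
          simp
        | false =>
          rw [hgroup _ h3]
          simp [PySem.List.min?]

-- ===== VERDICT (by name: the statement is the Claim_ definition above) =====
theorem file_analysis_priority_py_spec : Claim_equal_file_analysis_priority_py := by
  intro file_info _
  unfold Spec_file_analysis_priority_py file_analysis_priority_py file_analysis_priority_py_alt
  exact pv_core (PySem.Str.lower ((PySem.Dict.mk file_info).getD "path" ""))
    (fun k => PySem.Str.isIn k (PySem.Str.lower ((PySem.Dict.mk file_info).getD "path" "")))
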